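-- pv_equiv track=rewrite | github.com/Duke-Python/CPS101-APTs | CirclesCountry.py | leastBorders
-- ===== SOURCE A (Python) =====
-- def leastBorders(x, y, r, x1, y1, x2, y2):
--
--     start_cir = list()
--     end_cir = list()
--     for i in range(len(x)):
--         xc = x[i]
--         yc = y[i]
--         rc = r[i]
--
--         if ((x1-xc)**2 + (y1-yc)**2) < (rc**2):
--             start_cir.append(i)
--
--         if ((x2-xc)**2 + (y2-yc)**2) < (rc**2):
--             end_cir.append(i)
--
--     retval = len((set(start_cir) | set(end_cir))) - len((set(start_cir) & set(end_cir)))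
--
--     return retval
-- ===== SOURCE B (Python) =====
-- def leastBorders(x, y, r, x1, y1, x2, y2):
--     # inclusion-exclusion: |S (+) E| = |S| + |E| - 2*|S & E|, counted in three
--     # independent passes over the circles, with no index lists and no sets
--     circles = list(zip(x, y, r))
--     n1 = sum(1 for (xc, yc, rc) in circles
--              if (x1 - xc) ** 2 + (y1 - yc) ** 2 < rc ** 2)
--     n2 = sum(1 for (xc, yc, rc) in circles
--              if (x2 - xc) ** 2 + (y2 - yc) ** 2 < rc ** 2)
--     nboth = sum(1 for (xc, yc, rc) in circles
--                 if (x1 - xc) ** 2 + (y1 - yc) ** 2 < rc ** 2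
--                 and (x2 - xc) ** 2 + (y2 - yc) ** 2 < rc ** 2)
--     return n1 + n2 - 2 * nboth
-- ===== Notes on version B (the rewrite author's own statement) =====
-- stated objective: alternative
-- what changed: replaces A's indexed loop accumulating two index lists followed by a set union/intersection cardinality step (|S∪E|-|S∩E|) by three independent counting passes over zip(x,y,r) combined by the inclusion-exclusion formula n1+n2-2*nboth, with no index lists and no sets
import Mathlib
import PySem

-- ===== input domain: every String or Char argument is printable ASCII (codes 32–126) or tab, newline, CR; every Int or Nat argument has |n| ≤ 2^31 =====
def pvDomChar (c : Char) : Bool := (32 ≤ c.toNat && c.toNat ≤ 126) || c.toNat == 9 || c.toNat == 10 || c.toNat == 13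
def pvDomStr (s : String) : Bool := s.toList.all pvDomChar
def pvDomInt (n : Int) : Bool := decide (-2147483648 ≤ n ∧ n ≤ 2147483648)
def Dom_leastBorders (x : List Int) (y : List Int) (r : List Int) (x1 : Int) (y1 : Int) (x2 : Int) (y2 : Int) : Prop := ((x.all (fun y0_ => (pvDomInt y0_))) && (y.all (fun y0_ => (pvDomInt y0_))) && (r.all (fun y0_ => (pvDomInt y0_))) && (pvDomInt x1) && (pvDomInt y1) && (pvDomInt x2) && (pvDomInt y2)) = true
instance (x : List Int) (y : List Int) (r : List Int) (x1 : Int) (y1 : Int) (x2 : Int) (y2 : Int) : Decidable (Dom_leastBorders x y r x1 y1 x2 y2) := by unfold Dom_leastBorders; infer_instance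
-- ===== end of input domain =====

-- B replaces A's accumulated index lists + set union/intersection cardinalities by three
-- independent counting passes combined by inclusion-exclusion n1+n2-2*nboth (objective: alternative).

-- ===== PORT A =====
-- loop body of A's 'for i in range(len(x))': state = (start_cir, end_cir)
def aStep (x : List Int) (y : List Int) (r : List Int) (x1 : Int) (y1 : Int) (x2 : Int) (y2 : Int)
    (acc : List Int × List Int) (i : Int) : List Int × List Int :=
  let xc := PySem.List.pyGetD x i 0
  let yc := PySem.List.pyGetD y i 0
  let rc := PySem.List.pyGetD r i 0
  let s := if (x1 - xc) ^ 2 + (y1 - yc) ^ 2 < rc ^ 2 then acc.1 ++ [i] else acc.1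
  let e := if (x2 - xc) ^ 2 + (y2 - yc) ^ 2 < rc ^ 2 then acc.2 ++ [i] else acc.2
  (s, e)

def leastBorders (x : List Int) (y : List Int) (r : List Int) (x1 : Int) (y1 : Int) (x2 : Int) (y2 : Int) : Int :=
  let p := (PySem.List.pyRange 0 (x.length : Int) 1).foldl (aStep x y r x1 y1 x2 y2) ([], [])
  ((PySem.Set.len (PySem.Set.union (PySem.Set.ofList p.1) (PySem.Set.ofList p.2)) : Int)
    - (PySem.Set.len (PySem.Set.inter (PySem.Set.ofList p.1) (PySem.Set.ofList p.2)) : Int))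

-- ===== PORT B =====
-- B's three 'sum(1 for … in circles if …)' passes over circles = list(zip(x, y, r))
def leastBorders_alt (x : List Int) (y : List Int) (r : List Int) (x1 : Int) (y1 : Int) (x2 : Int) (y2 : Int) : Int :=
  let circles := x.zip (y.zip r)
  let n1 : Int := circles.countP (fun t => decide ((x1 - t.1) ^ 2 + (y1 - t.2.1) ^ 2 < t.2.2 ^ 2))
  let n2 : Int := circles.countP (fun t => decide ((x2 - t.1) ^ 2 + (y2 - t.2.1) ^ 2 < t.2.2 ^ 2))
  let nboth : Int := circles.countP (fun t =>
      decide ((x1 - t.1) ^ 2 + (y1 - t.2.1) ^ 2 < t.2.2 ^ 2)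
      && decide ((x2 - t.1) ^ 2 + (y2 - t.2.1) ^ 2 < t.2.2 ^ 2))
  n1 + n2 - 2 * nboth

-- ===== PRECONDITION & SPEC =====
-- Pre_ excludes exactly the inputs where A raises IndexError: y or r shorter than x.
def Pre_leastBorders (x : List Int) (y : List Int) (r : List Int) (x1 : Int) (y1 : Int) (x2 : Int) (y2 : Int) : Prop :=
  x.length ≤ y.length ∧ x.length ≤ r.length
instance (x : List Int) (y : List Int) (r : List Int) (x1 : Int) (y1 : Int) (x2 : Int) (y2 : Int) : Decidable (Pre_leastBorders x y r x1 y1 x2 y2) := by unfold Pre_leastBorders; infer_instance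
def pvWitness_leastBorders : List Int × List Int × List Int × Int × Int × Int × Int := ([0, 3], [0, 0], [5, 2], 1, 1, 9, 9)

def Spec_leastBorders (x : List Int) (y : List Int) (r : List Int) (x1 : Int) (y1 : Int) (x2 : Int) (y2 : Int) (out : Int) : Prop := out = leastBorders_alt x y r x1 y1 x2 y2
instance (x : List Int) (y : List Int) (r : List Int) (x1 : Int) (y1 : Int) (x2 : Int) (y2 : Int) (out : Int) : Decidable (Spec_leastBorders x y r x1 y1 x2 y2 out) := by unfold Spec_leastBorders; infer_instance

-- ===== CLAIM (what is proved, stated in full; the proofs are below) =====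
def Claim_equal_leastBorders : Prop := ∀ (x : List Int) (y : List Int) (r : List Int) (x1 : Int) (y1 : Int) (x2 : Int) (y2 : Int), Dom_leastBorders x y r x1 y1 x2 y2 → Pre_leastBorders x y r x1 y1 x2 y2 → Spec_leastBorders x y r x1 y1 x2 y2 (leastBorders x y r x1 y1 x2 y2)
-- ===== LEMMAS AND PROOFS =====

def fval (p : List Int × List Int) : Int :=
  ((PySem.Set.len (PySem.Set.union (PySem.Set.ofList p.1) (PySem.Set.ofList p.2)) : Int)
    - (PySem.Set.len (PySem.Set.inter (PySem.Set.ofList p.1) (PySem.Set.ofList p.2)) : Int))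

lemma fval_nodup (s e : List Int) (hs : s.Nodup) (he : e.Nodup) :
    fval (s, e) = (s.length : Int) + ((e.filter (fun j => !(PySem.Set.contains s j))).length : Int)
      - ((s.filter (fun j => PySem.Set.contains e j)).length : Int) := by
  unfold fval
  simp only [PySem.Set.ofList_eq_self_of_nodup s hs, PySem.Set.ofList_eq_self_of_nodup e he]
  rw [show PySem.Set.union s e = PySem.Set.update s e from rfl,
      PySem.Set.update_eq_append_filter]
  simp only [PySem.Set.ofList_eq_self_of_nodup e he]
  simp [PySem.Set.len, PySem.Set.inter]

lemma fval_step (s e : List Int) (i : Int) (hs : s.Nodup) (he : e.Nodup) (his : i ∉ s) (hie : i ∉ e)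
    (c1 c2 : Bool) :
    fval (if c1 = true then s ++ [i] else s, if c2 = true then e ++ [i] else e)
      = fval (s, e) + (if c1 != c2 then 1 else 0) := by
  have hs' : (s ++ [i]).Nodup := by
    rw [List.nodup_append]
    refine ⟨hs, List.nodup_singleton i, ?_⟩
    intro a ha b hb
    exact fun h => his ((List.mem_singleton.mp hb) ▸ h ▸ ha)
  have he' : (e ++ [i]).Nodup := by
    rw [List.nodup_append]
    refine ⟨he, List.nodup_singleton i, ?_⟩
    intro a ha b hb
    exact fun h => hie ((List.mem_singleton.mp hb) ▸ h ▸ ha)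
  have hfe : ∀ (t : List Int), i ∉ t →
      e.filter (fun j => !(PySem.Set.contains (t ++ [i]) j)) = e.filter (fun j => !(PySem.Set.contains t j)) := by
    intro t _
    apply List.filter_congr
    intro j hj
    have hji : j ≠ i := fun h => hie (h ▸ hj)
    simp [PySem.Set.contains_eq_listContains, hji]
  have hse : ∀ (t : List Int), s.filter (fun j => PySem.Set.contains (t ++ [i]) j) = s.filter (fun j => PySem.Set.contains t j) := by
    intro t
    apply List.filter_congr
    intro j hj
    have hji : j ≠ i := fun h => his (h ▸ hj)
    simp [PySem.Set.contains_eq_listContains, hji]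
  have hconsS : List.filter (fun j => !(PySem.Set.contains s j)) [i] = [i] := by
    simp [PySem.Set.contains_eq_listContains, his]
  have hconsSi : List.filter (fun j => !(PySem.Set.contains (s ++ [i]) j)) [i] = [] := by
    simp [PySem.Set.contains_eq_listContains]
  have hconsE : List.filter (fun j => PySem.Set.contains e j) [i] = [] := by
    simp [PySem.Set.contains_eq_listContains, hie]
  have hconsEi : List.filter (fun j => PySem.Set.contains (e ++ [i]) j) [i] = [i] := by
    simp [PySem.Set.contains_eq_listContains]
  cases c1 <;> cases c2 <;>
    simp only [Bool.false_eq_true, if_false, if_true]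
  · norm_num
  · rw [fval_nodup s (e ++ [i]) hs he', fval_nodup s e hs he,
        List.filter_append, hconsS, hse e]
    simp
    omega
  · rw [fval_nodup (s ++ [i]) e hs' he, fval_nodup s e hs he,
        hfe s his, List.filter_append, hconsE]
    simp
    omega
  · rw [fval_nodup (s ++ [i]) (e ++ [i]) hs' he', fval_nodup s e hs he,
        List.filter_append, hfe s his, hconsSi,
        List.filter_append, hse e, hconsEi]
    simp
    omega

def xorBit (x y r : List Int) (x1 y1 x2 y2 : Int) (i : Int) : Int :=
  if (decide ((x1 - PySem.List.pyGetD x i 0) ^ 2 + (y1 - PySem.List.pyGetD y i 0) ^ 2 < (PySem.List.pyGetD r i 0) ^ 2)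
      != decide ((x2 - PySem.List.pyGetD x i 0) ^ 2 + (y2 - PySem.List.pyGetD y i 0) ^ 2 < (PySem.List.pyGetD r i 0) ^ 2))
  then 1 else 0

lemma loop_fval (x y r : List Int) (x1 y1 x2 y2 : Int) :
    ∀ (idxs : List Int) (s e : List Int), s.Nodup → e.Nodup → idxs.Nodup →
      (∀ j ∈ idxs, j ∉ s ∧ j ∉ e) →
      fval (idxs.foldl (aStep x y r x1 y1 x2 y2) (s, e))
        = fval (s, e) + (idxs.map (xorBit x y r x1 y1 x2 y2)).sum := by
  intro idxs
  induction idxs with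
  | nil => intro s e _ _ _ _; simp
  | cons i is ih =>
    intro s e hs he hnd hfresh
    have hnd' := (List.nodup_cons.mp hnd)
    have hi := hfresh i (List.mem_cons_self ..)
    have hfs : ∀ j ∈ is, j ∉ s ++ [i] ∧ j ∉ e ++ [i] := by
      intro j hj
      have hji : j ≠ i := fun h => hnd'.1 (h ▸ hj)
      have := hfresh j (List.mem_cons_of_mem _ hj)
      constructor <;> · rw [List.mem_append, List.mem_singleton]; rintro (h | h); exacts [absurd h (by tauto), hji h]
    have hfs1 : ∀ j ∈ is, j ∉ s ++ [i] ∧ j ∉ e := fun j hj => ⟨(hfs j hj).1, (hfresh j (List.mem_cons_of_mem _ hj)).2⟩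
    have hfs2 : ∀ j ∈ is, j ∉ s ∧ j ∉ e ++ [i] := fun j hj => ⟨(hfresh j (List.mem_cons_of_mem _ hj)).1, (hfs j hj).2⟩
    have hfs0 : ∀ j ∈ is, j ∉ s ∧ j ∉ e := fun j hj => hfresh j (List.mem_cons_of_mem _ hj)
    have hs' : (s ++ [i]).Nodup := by
      rw [List.nodup_append]
      refine ⟨hs, List.nodup_singleton i, ?_⟩
      intro a ha b hb
      exact fun h => hi.1 ((List.mem_singleton.mp hb) ▸ h ▸ ha)
    have he' : (e ++ [i]).Nodup := by
      rw [List.nodup_append]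
      refine ⟨he, List.nodup_singleton i, ?_⟩
      intro a ha b hb
      exact fun h => hi.2 ((List.mem_singleton.mp hb) ▸ h ▸ ha)
    simp only [List.foldl_cons, List.map_cons, List.sum_cons]
    by_cases h1 : (x1 - PySem.List.pyGetD x i 0) ^ 2 + (y1 - PySem.List.pyGetD y i 0) ^ 2 < (PySem.List.pyGetD r i 0) ^ 2 <;>
    by_cases h2 : (x2 - PySem.List.pyGetD x i 0) ^ 2 + (y2 - PySem.List.pyGetD y i 0) ^ 2 < (PySem.List.pyGetD r i 0) ^ 2 <;>
      simp only [aStep, xorBit, h1, h2, decide_true, decide_false, if_pos, if_neg, not_false_iff]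
    · rw [ih (s ++ [i]) (e ++ [i]) hs' he' hnd'.2 hfs]
      have := fval_step s e i hs he hi.1 hi.2 true true
      simp only [if_true] at this
      rw [this]; norm_num
    · rw [ih (s ++ [i]) e hs' he hnd'.2 hfs1]
      have := fval_step s e i hs he hi.1 hi.2 true false
      simp only [if_true, Bool.false_eq_true, if_false] at this
      rw [this]; norm_num; ring
    · rw [ih s (e ++ [i]) hs he' hnd'.2 hfs2]
      have := fval_step s e i hs he hi.1 hi.2 false true
      simp only [if_true, Bool.false_eq_true, if_false] at this
      rw [this]; norm_num; ring
    · rw [ih s e hs he hnd'.2 hfs0]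
      have := fval_step s e i hs he hi.1 hi.2 false false
      simp only [Bool.false_eq_true, if_false] at this
      rw [this]; norm_num

-- bridge: counting a per-index predicate over range(len x) equals counting over zip(x,y,r)
lemma countP_bridge (P : Int → Int → Int → Bool) :
    ∀ (x y r : List Int), x.length ≤ y.length → x.length ≤ r.length →
    List.countP (fun i => P (PySem.List.pyGetD x i 0) (PySem.List.pyGetD y i 0) (PySem.List.pyGetD r i 0))
      (PySem.List.pyRange 0 (x.length : Int) 1)
    = List.countP (fun t => P t.1 t.2.1 t.2.2) (x.zip (y.zip r)) := by
  intro x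
  induction x with
  | nil => intro y r _ _; simp
  | cons xc xs ih =>
    intro y r hy hr
    match y, r with
    | [], _ => simp at hy
    | _, [] => simp at hr
    | yc :: ys, rc :: rs =>
      simp only [List.length_cons] at hy hr
      rw [List.zip_cons_cons, List.zip_cons_cons, List.countP_cons]
      have hlen : (((xc :: xs).length : Nat) : Int) = (xs.length : Int) + 1 := by simp
      rw [hlen, PySem.List.pyRange_one_cons (by positivity), List.countP_cons]
      have hshift :
          List.countP (fun i => P (PySem.List.pyGetD (xc::xs) i 0) (PySem.List.pyGetD (yc::ys) i 0) (PySem.List.pyGetD (rc::rs) i 0))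
            (PySem.List.pyRange (0+1) ((xs.length : Int) + 1) 1)
          = List.countP (fun i => P (PySem.List.pyGetD xs i 0) (PySem.List.pyGetD ys i 0) (PySem.List.pyGetD rs i 0))
            (PySem.List.pyRange 0 (xs.length : Int) 1) := by
        rw [PySem.List.pyRange_one (0+1), PySem.List.pyRange_one 0]
        have e1 : (((xs.length : Int) + 1) - (0+1)).toNat = xs.length := by omega
        have e2 : ((xs.length : Int) - 0).toNat = xs.length := by omega
        rw [e1, e2, List.countP_map, List.countP_map]
        apply List.countP_congr
        intro k _
        have h1 : (0:Int) + 1 + (k:Int) = ((k+1 : Nat) : Int) := by push_cast; ring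
        have h0 : (0:Int) + (k:Int) = ((k : Nat) : Int) := by ring
        simp only [Function.comp, h1, h0, PySem.List.pyGetD_natCast]
        simp
      rw [hshift, ih ys rs (by omega) (by omega)]
      have hz : PySem.List.pyGetD (xc::xs) 0 0 = xc := by simp [PySem.List.pyGetD]
      have hz2 : PySem.List.pyGetD (yc::ys) 0 0 = yc := by simp [PySem.List.pyGetD]
      have hz3 : PySem.List.pyGetD (rc::rs) 0 0 = rc := by simp [PySem.List.pyGetD]
      rw [hz, hz2, hz3]

-- inclusion-exclusion on counts: #{xor} = #{p} + #{q} - 2*#{p ∧ q}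
lemma countP_xor {T : Type} (p q : T → Bool) :
    ∀ (l : List T),
    (l.countP (fun t => p t != q t) : Int)
      = (l.countP p : Int) + (l.countP q : Int) - 2 * (l.countP (fun t => p t && q t) : Int) := by
  intro l
  induction l with
  | nil => simp
  | cons a tl ih =>
    simp only [List.countP_cons]
    cases hp : p a <;> cases hq : q a <;> push_cast <;> simp <;> omega

-- ===== VERDICT (by name: the statement is the Claim_ definition above) =====
theorem leastBorders_spec : Claim_equal_leastBorders := by
  intro x y r x1 y1 x2 y2 _hdom hpre
  obtain ⟨hy, hr⟩ := hpre
  unfold Spec_leastBorders leastBorders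
  show fval ((PySem.List.pyRange 0 (x.length : Int) 1).foldl (aStep x y r x1 y1 x2 y2) ([], []))
    = leastBorders_alt x y r x1 y1 x2 y2
  rw [loop_fval x y r x1 y1 x2 y2 (PySem.List.pyRange 0 (x.length : Int) 1) [] []
    List.nodup_nil List.nodup_nil (PySem.List.nodup_pyRange_one _ _) (by simp)]
  have hz : fval ([], []) = 0 := by simp [fval, PySem.Set.len]
  rw [hz, zero_add]
  unfold xorBit
  rw [PySem.List.sum_map_ite_one_zero]
  rw [countP_bridge (fun xc yc rc => (decide ((x1 - xc) ^ 2 + (y1 - yc) ^ 2 < rc ^ 2)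
      != decide ((x2 - xc) ^ 2 + (y2 - yc) ^ 2 < rc ^ 2))) x y r hy hr]
  rw [countP_xor]
  rfl
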